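-- pv_equiv track=rewrite | github.com/Rhytam-01/IITM-PYTHON-Grpa | OPPE 1 MAY 24/Set2/Question 4.py | longest_antakshari_subsequence
-- ===== SOURCE A (Python) =====
-- def longest_antakshari_subsequence(n: int, sequences: list) -> list:
--     results = []
--
--     # Iterate over each sequence
--     for seq in sequences:
--         words = seq.split(',')
--         max_len = 1  # The minimum valid subsequence is a single word.
--         current_len = 1  # Start with the first word
--
--         # Iterate through the words and check for the antakshari property
--         for i in range(1, len(words)):
--             if words[i-1][-1] == words[i][0]:  # last letter of previous == first letter of current
--                 current_len += 1  # Extend the subsequence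
--             else:
--                 # Reset the current sequence length
--                 max_len = max(max_len, current_len)
--                 current_len = 1
--
--         # Update the maximum length after the last word
--         max_len = max(max_len, current_len)
--         results.append(max_len)
--
--     return results
-- ===== SOURCE B (Python) =====
-- def longest_antakshari_subsequence(n: int, sequences: list) -> list:
--     results = []
--     for seq in sequences:
--         words = seq.split(',')
--         # positions where the chain is broken, with sentinels 0 and len(words);
--         # the answer is the widest gap between consecutive break positions
--         breaks = [0] \
--             + [j for j in range(1, len(words)) if words[j - 1][-1] != words[j][0]] \
--             + [len(words)]
--         results.append(max(b - a for a, b in zip(breaks, breaks[1:])))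
--     return results
-- ===== Notes on version B (the rewrite author's own statement) =====
-- stated objective: alternative
-- what changed: Instead of A's running max_len/current_len state machine, B computes the list of break positions (indices where the chain fails, with sentinels 0 and len(words)) and returns the maximum gap between consecutive break positions.
import Mathlib
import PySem

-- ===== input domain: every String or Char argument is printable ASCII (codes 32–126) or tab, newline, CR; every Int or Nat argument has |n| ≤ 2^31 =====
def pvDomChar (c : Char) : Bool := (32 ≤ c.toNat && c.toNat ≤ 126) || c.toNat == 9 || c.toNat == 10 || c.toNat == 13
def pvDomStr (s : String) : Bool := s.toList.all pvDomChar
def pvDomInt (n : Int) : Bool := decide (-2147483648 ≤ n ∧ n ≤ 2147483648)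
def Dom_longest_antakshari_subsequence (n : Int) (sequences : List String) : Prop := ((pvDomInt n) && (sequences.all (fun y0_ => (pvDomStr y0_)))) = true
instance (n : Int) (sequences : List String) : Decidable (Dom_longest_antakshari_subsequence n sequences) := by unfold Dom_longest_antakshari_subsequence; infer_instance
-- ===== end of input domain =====

-- B replaces A's running max_len/current_len state machine by a break-position view:
-- collect the indices where the chain fails (with sentinels 0 and len(words)) and return
-- the widest gap between consecutive break positions; same cost.

-- ===== PORT A =====
-- per-sequence body of A: state (max_len, current_len), loop i in range(1, len(words));
-- seq.split(',') has the literal nonempty separator ',', so split? is always some (.getD [] unreachable)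
def pvSeqScoreA (words : List String) : Int :=
  let st := (PySem.List.pyRange 1 (words.length : Int) 1).foldl
    (fun (st : Int × Int) (i : Int) =>
      if PySem.Str.pyGet? (PySem.List.pyGetD words (i - 1) "") (-1)
           = PySem.Str.pyGet? (PySem.List.pyGetD words i "") 0
      then (st.1, st.2 + 1)
      else (max st.1 st.2, 1)) ((1 : Int), (1 : Int))
  max st.1 st.2

def longest_antakshari_subsequence (n : Int) (sequences : List String) : List Int :=
  sequences.foldl (fun results seq => results ++ [pvSeqScoreA ((PySem.Str.split? seq ",").getD [])]) []

-- ===== PORT B =====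
-- breaks = [0] + [j for j in range(1, len(words)) if words[j-1][-1] != words[j][0]] + [len(words)]
def pvBreaks (words : List String) : List Int :=
  [0] ++ ((PySem.List.pyRange 1 (words.length : Int) 1).filter
      (fun j => !decide (PySem.Str.pyGet? (PySem.List.pyGetD words (j - 1) "") (-1)
                       = PySem.Str.pyGet? (PySem.List.pyGetD words j "") 0)))
    ++ [(words.length : Int)]

-- max(b - a for a, b in zip(breaks, breaks[1:])); [] default unreachable (breaks has ≥ 2 elements)
def pvMaxGap (breaks : List Int) : Int :=
  match (breaks.zip (breaks.drop 1)).map (fun p => p.2 - p.1) with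
  | [] => 0
  | g :: gs => gs.foldl max g

def longest_antakshari_subsequence_alt (n : Int) (sequences : List String) : List Int :=
  sequences.map (fun seq => pvMaxGap (pvBreaks ((PySem.Str.split? seq ",").getD [])))

-- ===== PRECONDITION & SPEC =====
-- Pre_ excludes exactly the inputs where Python A raises IndexError: a sequence whose split
-- has ≥ 2 words one of which is empty (then words[i-1][-1] / words[i][0] indexes into "").
def Pre_longest_antakshari_subsequence (n : Int) (sequences : List String) : Prop :=
  ∀ seq ∈ sequences,
    ((PySem.Str.split? seq ",").getD []).length ≤ 1 ∨
      ∀ w ∈ (PySem.Str.split? seq ",").getD [], w ≠ ""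
instance (n : Int) (sequences : List String) : Decidable (Pre_longest_antakshari_subsequence n sequences) := by unfold Pre_longest_antakshari_subsequence; infer_instance

def pvWitness_longest_antakshari_subsequence : Int × List String := (2, ["ab,bc,cd,xx,xy,yz", "hello", ""])

def Spec_longest_antakshari_subsequence (n : Int) (sequences : List String) (out : List Int) : Prop := out = longest_antakshari_subsequence_alt n sequences
instance (n : Int) (sequences : List String) (out : List Int) : Decidable (Spec_longest_antakshari_subsequence n sequences out) := by unfold Spec_longest_antakshari_subsequence; infer_instance

-- ===== CLAIM (what is proved, stated in full; the proofs are below) =====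
def Claim_equal_longest_antakshari_subsequence : Prop := ∀ (n : Int) (sequences : List String), Dom_longest_antakshari_subsequence n sequences → Pre_longest_antakshari_subsequence n sequences → Spec_longest_antakshari_subsequence n sequences (longest_antakshari_subsequence n sequences)

-- ===== LEMMAS AND PROOFS =====

-- running max over gaps between consecutive break positions, carried as (best, previous break)
def pvGapFold (lb : Int) (bs : List Int) (M : Int) : Int :=
  (bs.foldl (fun (p : Int × Int) b => (max p.1 (b - p.2), b)) (M, lb)).1

theorem pvGapFold_nil (lb M : Int) : pvGapFold lb [] M = M := rfl

theorem pvGapFold_cons (lb b M : Int) (bs : List Int) :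
    pvGapFold lb (b :: bs) M = pvGapFold b bs (max M (b - lb)) := rfl

-- B's zip-of-adjacent-pairs max equals the gap fold
theorem pvZip_eq_gapFold (bs : List Int) : ∀ (lb M : Int),
    ((((lb :: bs).zip bs).map (fun p => p.2 - p.1)).foldl max M) = pvGapFold lb bs M := by
  induction bs with
  | nil => intro lb M; rfl
  | cons b rest ih =>
    intro lb M
    simp only [List.zip_cons_cons, List.map_cons, List.foldl_cons]
    rw [ih b (max M (b - lb)), pvGapFold_cons]

-- core invariant: A's (max_len, current_len) scan over [s, b) with current = s - lb equals
-- the gap fold over the break positions in [s, b) followed by the sentinel b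
theorem pvScan_eq_breaks (c : Int → Bool) :
    ∀ (k : Nat) (s lb M : Int), s + (k : Int) = b →
    max ((PySem.List.pyRange s b 1).foldl
          (fun (st : Int × Int) i => if c i then (st.1, st.2 + 1) else (max st.1 st.2, 1))
          (M, s - lb)).1
        ((PySem.List.pyRange s b 1).foldl
          (fun (st : Int × Int) i => if c i then (st.1, st.2 + 1) else (max st.1 st.2, 1))
          (M, s - lb)).2
      = pvGapFold lb (((PySem.List.pyRange s b 1).filter (fun i => !c i)) ++ [b]) M := by
  intro k
  induction k with
  | zero =>
    intro s lb M h
    have hb : b = s := by omega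
    subst hb
    rw [PySem.List.pyRange_one_eq_nil le_rfl]
    simp [pvGapFold_cons, pvGapFold_nil]
  | succ m ih =>
    intro s lb M h
    have hsb : s < b := by omega
    rw [PySem.List.pyRange_one_cons hsb]
    by_cases hc : c s = true
    · simp only [List.foldl_cons, List.filter_cons, hc, Bool.not_true,
        Bool.false_eq_true, if_false]
      have hcur : s - lb + 1 = s + 1 - lb := by ring
      rw [hcur]
      exact ih (s + 1) lb M (by omega)
    · have hc' : (!c s) = true := by simp [Bool.not_eq_true] at hc ⊢; exact hc
      simp only [List.foldl_cons, List.filter_cons, if_neg hc, hc', if_true]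
      rw [List.cons_append, pvGapFold_cons]
      have h' := ih (s + 1) s (max M (s - lb)) (by omega)
      rw [show s + 1 - s = (1 : Int) by ring] at h'
      exact h'

-- the final comparison of the two accumulation shapes, for break positions ≥ 1
theorem pvGap_final (F : List Int) (L : Int) (hF : ∀ x ∈ F, 1 ≤ x) (hL : 1 ≤ L) :
    pvGapFold 0 (F ++ [L]) 1 = pvMaxGap ([0] ++ F ++ [L]) := by
  cases F with
  | nil =>
    simp only [List.nil_append, pvMaxGap]
    rw [pvGapFold_cons, pvGapFold_nil]
    simp
    omega
  | cons f fs =>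
    have hf : 1 ≤ f := hF f List.mem_cons_self
    simp only [List.cons_append, List.nil_append, pvMaxGap, List.drop_succ_cons,
      List.drop_zero, List.zip_cons_cons, List.map_cons]
    rw [pvGapFold_cons]
    have h1 : max (1 : Int) (f - 0) = f := by omega
    have h2 : f - 0 = f := by ring
    rw [h1]
    rw [pvZip_eq_gapFold (fs ++ [L]) f (f - 0), h2]

-- per-sequence agreement, for a nonempty word list
theorem pvPerSeq (words : List String) (hw : words ≠ []) :
    pvSeqScoreA words = pvMaxGap (pvBreaks words) := by
  unfold pvSeqScoreA pvBreaks
  have hL : (1 : Int) ≤ (words.length : Int) := by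
    have : 0 < words.length := List.length_pos_iff.mpr hw
    omega
  have hstep : (fun (st : Int × Int) (i : Int) =>
      if PySem.Str.pyGet? (PySem.List.pyGetD words (i - 1) "") (-1)
           = PySem.Str.pyGet? (PySem.List.pyGetD words i "") 0
      then (st.1, st.2 + 1) else (max st.1 st.2, 1))
      = (fun (st : Int × Int) (i : Int) =>
          if (fun j => decide (PySem.Str.pyGet? (PySem.List.pyGetD words (j - 1) "") (-1)
               = PySem.Str.pyGet? (PySem.List.pyGetD words j "") 0)) i
          then (st.1, st.2 + 1) else (max st.1 st.2, 1)) := by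
    funext st i; simp
  have hkey := pvScan_eq_breaks (b := (words.length : Int))
      (fun j => decide (PySem.Str.pyGet? (PySem.List.pyGetD words (j - 1) "") (-1)
        = PySem.Str.pyGet? (PySem.List.pyGetD words j "") 0))
      ((words.length : Int) - 1).toNat 1 0 1 (by omega)
  simp only [sub_zero] at hkey
  rw [hstep]
  refine hkey.trans ?_
  refine pvGap_final _ _ ?_ hL
  intro x hx
  have hm := List.mem_filter.mp hx
  exact (PySem.List.mem_pyRange_one.mp hm.1).1

-- splitOn's worker always produces at least one piece
theorem pvGo_ne_nil (sep : List Char) : ∀ (fuel : Nat) (l cur : List Char)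
    (acc : List (List Char)), PySem.Chars.splitOn.go sep fuel l cur acc ≠ [] := by
  intro fuel
  induction fuel with
  | zero => intro l cur acc; simp [PySem.Chars.splitOn.go]
  | succ f ih =>
    intro l cur acc
    cases l with
    | nil => simp [PySem.Chars.splitOn.go]
    | cons c rest =>
      rw [PySem.Chars.splitOn.go]
      split_ifs with h
      · exact ih _ _ _
      · exact ih _ _ _

-- split by a nonempty separator never yields the empty list
theorem pvSplit_ne_nil (s : String) : (PySem.Str.split? s ",").getD [] ≠ [] := by
  have h := pvGo_ne_nil [','] (s.toList.length + 1) s.toList [] []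
  simp [PySem.Str.split?, PySem.Chars.split?, PySem.Chars.splitOn]
  simpa using h

-- ===== VERDICT (by name: the statement is the Claim_ definition above) =====
theorem longest_antakshari_subsequence_spec : Claim_equal_longest_antakshari_subsequence := by
  intro n sequences _ _
  unfold Spec_longest_antakshari_subsequence longest_antakshari_subsequence
    longest_antakshari_subsequence_alt
  rw [PySem.List.foldl_append_singleton_eq_map]
  exact List.map_congr_left (fun seq _ =>
    pvPerSeq ((PySem.Str.split? seq ",").getD []) (pvSplit_ne_nil seq))
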